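-- pv_equiv track=rewrite | github.com/ntpz870817/Chamaeleo | methods/components/validity.py | inverse_motif_repeat
-- ===== SOURCE A (Python) =====
-- def inverse_motif_repeat(sequence, max_length):
--     """
--     Check the inverse motif repeat of requested DNA sequence.
--
--     :param sequence: requested DNA sequence.
--     :param max_length: maximum length of simple segment, including (normal, inverse, dyad) motif repeat.
--
--     :return: whether the DNA sequence is validly.
--     """
--     length = len(sequence) - 1
--     while length > max_length:
--         for index in range(len(sequence)):
--             if index + length < len(sequence):
--                 sample = sequence[index: index + length]
--                 if sequence.count(sample[::-1]) > 0:
--                     return False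
--         length -= 1
--
--     return True
-- ===== SOURCE B (Python) =====
-- def inverse_motif_repeat(sequence, max_length):
--     n = len(sequence)
--     if n == 0 or max_length >= n - 1:
--         return True
--     if max_length < 0:
--         return False
--     k = max_length + 1
--     rev = sequence[::-1]
--     grams = {rev[j:j + k] for j in range(n - k + 1)}
--     return all(sequence[i:i + k] not in grams for i in range(n - k + 1))
-- ===== Notes on version B (the rewrite author's own statement) =====
-- stated objective: faster
-- what changed: Instead of scanning every motif length from n-1 downwards with a quadratic str.count inside two nested loops, B checks only the single critical length k = max_length+1 (a longer reverse repeat always contains one of length k): it hashes all k-grams of the reversed sequence into a set and tests every k-gram of the sequence for membership.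
-- intended difference: When the only reverse repeat of length max_length+1 is the one ending at the very end of the sequence, A's strict bound 'index + length < len(sequence)' skips that last window and A wrongly returns True, while B checks every window and returns False, which is the intended answer since such a repeat does exist. — e.g. on inverse_motif_repeat("abb", 1): A returns true, B returns false
import Mathlib
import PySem

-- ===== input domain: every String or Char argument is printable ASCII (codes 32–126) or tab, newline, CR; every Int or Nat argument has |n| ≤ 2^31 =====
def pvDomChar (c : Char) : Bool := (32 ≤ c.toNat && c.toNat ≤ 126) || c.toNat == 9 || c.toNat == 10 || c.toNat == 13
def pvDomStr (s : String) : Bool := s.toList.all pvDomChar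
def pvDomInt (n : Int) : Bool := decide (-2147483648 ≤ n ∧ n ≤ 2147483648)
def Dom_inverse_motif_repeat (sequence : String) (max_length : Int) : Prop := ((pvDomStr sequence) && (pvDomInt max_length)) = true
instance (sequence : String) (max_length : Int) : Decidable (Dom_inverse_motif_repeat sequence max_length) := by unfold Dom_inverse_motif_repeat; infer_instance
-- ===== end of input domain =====

-- B replaces A's scan over all motif lengths by a k-gram set-membership test at the single
-- critical length max_length+1 (objective: faster, asymptotically); B checks every window,
-- so it differs from A exactly on D_ below, where A's off-by-one skips the last window.

-- ===== PORT A =====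
-- inner 'for index in range(len(sequence)): if index+length < len(sequence): … return False'
def pvInnerA (seq : List Char) (length : Int) : Bool :=
  (PySem.List.pyRange 0 (seq.length : Int) 1).any (fun index =>
    decide (index + length < (seq.length : Int)) &&
    decide (0 < PySem.Chars.count seq
      (PySem.Chars.slice seq (some index) (some (index + length))).reverse))

-- 'while length > max_length: … length -= 1', counting the remaining iterations as fuel:
-- at fuel f the current length is max_length + f, so fuel 0 is 'length = max_length: stop'.
def pvLoopA (seq : List Char) (max_length : Int) : Nat → Bool
  | 0 => true
  | fuel + 1 =>
    if pvInnerA seq (max_length + fuel + 1) then false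
    else pvLoopA seq max_length fuel

def inverse_motif_repeat (sequence : String) (max_length : Int) : Bool :=
  pvLoopA sequence.toList max_length (((sequence.toList.length : Int) - 1 - max_length).toNat)

-- ===== PORT B =====
-- grams = {rev[j:j+k] for j in range(n-k+1)}
def pvGramsB (rev : List Char) (n k : Int) : PySem.Set (List Char) :=
  PySem.Set.ofList ((PySem.List.pyRange 0 (n - k + 1) 1).map
    (fun j => PySem.List.slice rev (some j) (some (j + k))))

def inverse_motif_repeat_alt (sequence : String) (max_length : Int) : Bool :=
  let seq := sequence.toList
  let n : Int := seq.length
  if n = 0 ∨ max_length ≥ n - 1 then true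
  else if max_length < 0 then false
  else
    let k : Int := max_length + 1
    let rev := seq.reverse
    let grams := pvGramsB rev n k
    (PySem.List.pyRange 0 (n - k + 1) 1).all
      (fun i => !(PySem.Set.contains grams (PySem.List.slice seq (some i) (some (i + k)))))

-- ===== PRECONDITION & SPEC =====
-- On inputs whose ONLY reverse repeat of length max_length+1 is the window ending at the very
-- end of the sequence, A's strict bound 'index + length < len(sequence)' skips that window and
-- A returns True; B checks every window and returns False, the intended answer.
def D_inverse_motif_repeat (sequence : String) (max_length : Int) : Prop :=
  let s := sequence.toList
  let k := (max_length + 1).toNat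
  0 ≤ max_length ∧ (k : Int) < s.length ∧
    ∀ i ≤ s.length - k, (((s.drop i).take k).reverse <:+: s ↔ i = s.length - k)

instance (sequence : String) (max_length : Int) : Decidable (D_inverse_motif_repeat sequence max_length) := by unfold D_inverse_motif_repeat; infer_instance

def Spec_inverse_motif_repeat (sequence : String) (max_length : Int) (out : Bool) : Prop := ¬ D_inverse_motif_repeat sequence max_length → out = inverse_motif_repeat_alt sequence max_length
instance (sequence : String) (max_length : Int) (out : Bool) : Decidable (Spec_inverse_motif_repeat sequence max_length out) := by unfold Spec_inverse_motif_repeat; infer_instance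

def pvDiffWitness_inverse_motif_repeat : String × Int := ("abb", 1)
def pvDiffWitnessOut_inverse_motif_repeat : Bool × Bool := (true, false)

-- ===== CLAIM (what is proved, stated in full; the proofs are below) =====
def Claim_unchanged_inverse_motif_repeat : Prop := ∀ (sequence : String) (max_length : Int), Dom_inverse_motif_repeat sequence max_length → Spec_inverse_motif_repeat sequence max_length (inverse_motif_repeat sequence max_length)
def Claim_changed_inverse_motif_repeat : Prop := Dom_inverse_motif_repeat (pvDiffWitness_inverse_motif_repeat.1) (pvDiffWitness_inverse_motif_repeat.2) ∧ D_inverse_motif_repeat (pvDiffWitness_inverse_motif_repeat.1) (pvDiffWitness_inverse_motif_repeat.2) ∧ inverse_motif_repeat (pvDiffWitness_inverse_motif_repeat.1) (pvDiffWitness_inverse_motif_repeat.2) = pvDiffWitnessOut_inverse_motif_repeat.1 ∧ inverse_motif_repeat_alt (pvDiffWitness_inverse_motif_repeat.1) (pvDiffWitness_inverse_motif_repeat.2) = pvDiffWitnessOut_inverse_motif_repeat.2 ∧ pvDiffWitnessOut_inverse_motif_repeat.1 ≠ pvDiffWitnessOut_inverse_motif_repeat.2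
def Claim_exact_inverse_motif_repeat : Prop := ∀ (sequence : String) (max_length : Int), Dom_inverse_motif_repeat sequence max_length → D_inverse_motif_repeat sequence max_length → inverse_motif_repeat sequence max_length ≠ inverse_motif_repeat_alt sequence max_length

-- ===== LEMMAS AND PROOFS =====

-- 'the reversed window of length k starting at i occurs somewhere in s' (proof-only helper)
def pvRevHit (s : List Char) (k i : Nat) : Prop := ((s.drop i).take k).reverse <:+: s

-- D_ unpacked into the form the proofs use
lemma pvD_iff (sequence : String) (m : Int) :
    D_inverse_motif_repeat sequence m ↔
      0 ≤ m ∧ m + 1 < (sequence.toList.length : Int) ∧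
      pvRevHit sequence.toList (m + 1).toNat
        (sequence.toList.length - (m + 1).toNat) ∧
      ∀ i < sequence.toList.length - (m + 1).toNat,
        ¬ pvRevHit sequence.toList (m + 1).toNat i := by
  unfold D_inverse_motif_repeat pvRevHit
  constructor
  · rintro ⟨h0, h1, h2⟩
    have hK : (((m + 1).toNat : Nat) : Int) = m + 1 := Int.toNat_of_nonneg (by omega)
    refine ⟨h0, by omega, (h2 _ le_rfl).mpr rfl, fun i hi hhit => ?_⟩
    have := (h2 i (by omega)).mp hhit
    omega
  · rintro ⟨h0, h1, h2, h3⟩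
    have hK : (((m + 1).toNat : Nat) : Int) = m + 1 := Int.toNat_of_nonneg (by omega)
    refine ⟨h0, by omega, fun i hi => ⟨fun hhit => ?_, fun he => he ▸ h2⟩⟩
    by_contra hne
    exact h3 i (by omega) hhit

-- what one pass of A's inner loop finds at a given motif length (proof-only helper)
def pvFound (seq : List Char) (L : Int) : Prop :=
  ∃ i : Int, 0 ≤ i ∧ i < (seq.length : Int) ∧ i + L < (seq.length : Int) ∧
    (PySem.List.slice seq (some i) (some (i + L))).reverse <:+: seq

-- a k-gram of seq at position i < bound matching some k-gram of seq.reverse (proof-only helper)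
def pvGramMatch (seq : List Char) (k bound : Int) : Prop :=
  ∃ i : Int, 0 ≤ i ∧ i < bound ∧
    ∃ j : Int, 0 ≤ j ∧ j < (seq.length : Int) - k + 1 ∧
      PySem.List.slice seq.reverse (some j) (some (j + k)) = PySem.List.slice seq (some i) (some (i + k))

-- str.count's worker never decreases the accumulator
lemma pvGo_le (sub : List Char) : ∀ (fuel : Nat) (l : List Char) (acc : Nat),
    acc ≤ PySem.Chars.count.go sub fuel l acc := by
  intro fuel
  induction fuel with
  | zero => intro l acc; rw [PySem.Chars.count.go]
  | succ f ih =>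
    intro l acc
    cases l with
    | nil => simp [PySem.Chars.count.go]
    | cons h t =>
      rw [PySem.Chars.count.go]
      split
      · exact le_trans (Nat.le_succ acc) (ih _ _)
      · exact ih _ _

-- positivity of str.count's worker ⇔ the (non-empty) pattern occurs
lemma pvGo_pos_iff (sub : List Char) (hsub : sub ≠ []) : ∀ (fuel : Nat) (l : List Char) (acc : Nat),
    l.length ≤ fuel → (acc < PySem.Chars.count.go sub fuel l acc ↔ sub <:+: l) := by
  intro fuel
  induction fuel with
  | zero =>
    intro l acc hl
    have : l = [] := List.eq_nil_of_length_eq_zero (Nat.le_zero.mp hl)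
    subst this
    rw [PySem.Chars.count.go]
    simp [List.infix_nil, hsub]
  | succ f ih =>
    intro l acc hl
    cases l with
    | nil =>
      simp [PySem.Chars.count.go, List.infix_nil, hsub]
    | cons h t =>
      rw [PySem.Chars.count.go]
      split
      · rename_i hpre
        constructor
        · intro _
          exact ((List.isPrefixOf_iff_prefix.mp hpre).isInfix)
        · intro _
          exact lt_of_lt_of_le (Nat.lt_succ_self acc) (pvGo_le sub f _ _)
      · rename_i hpre
        have hnp : ¬ sub <+: (h :: t) := fun hc => hpre (List.isPrefixOf_iff_prefix.mpr hc)
        rw [ih t acc (by simpa using Nat.lt_succ_iff.mp (Nat.lt_of_lt_of_le (by simp) hl))]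
        rw [List.infix_cons_iff]
        tauto

-- sequence.count(x) > 0 ⇔ x is a substring
lemma pvCount_pos_iff (s sub : List Char) : 0 < PySem.Chars.count s sub ↔ sub <:+: s := by
  unfold PySem.Chars.count
  by_cases h : sub.isEmpty
  · simp [List.isEmpty_iff.mp h]
  · have hsub : sub ≠ [] := by simpa [List.isEmpty_iff] using h
    simp only [h]
    exact pvGo_pos_iff sub hsub s.length s 0 le_rfl

lemma pvInnerA_iff (seq : List Char) (L : Int) : pvInnerA seq L = true ↔ pvFound seq L := by
  simp only [pvInnerA, pvFound, List.any_eq_true, PySem.List.mem_pyRange_one,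
    Bool.and_eq_true, decide_eq_true_eq, pvCount_pos_iff, PySem.Chars.slice_eq_listSlice]
  exact exists_congr fun i => by tauto

lemma pvLoopA_false_iff (seq : List Char) (m : Int) : ∀ (fuel : Nat),
    pvLoopA seq m fuel = false ↔ ∃ L, m < L ∧ L ≤ m + fuel ∧ pvFound seq L := by
  intro fuel
  induction fuel with
  | zero =>
    rw [pvLoopA]
    constructor
    · simp
    · rintro ⟨L, h1, h2, _⟩; omega
  | succ f ih =>
    rw [pvLoopA]
    by_cases hin : pvInnerA seq (m + f + 1) = true
    · simp only [hin, if_true]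
      constructor
      · intro _
        exact ⟨m + f + 1, by omega, by push_cast; omega, (pvInnerA_iff seq _).mp hin⟩
      · intro _; simp
    · simp only [Bool.not_eq_true] at hin
      rw [hin]
      simp only [Bool.false_eq_true, if_false]
      rw [ih]
      constructor
      · rintro ⟨L, h1, h2, h3⟩; exact ⟨L, h1, by push_cast; omega, h3⟩
      · rintro ⟨L, h1, h2, h3⟩
        refine ⟨L, h1, ?_, h3⟩
        push_cast at h2
        by_cases hL : L = m + f + 1
        · subst hL
          exact absurd ((pvInnerA_iff seq _).mpr h3) (by simp [hin])
        · omega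

-- a length-k slice at nat positions, as drop/take
lemma pvSliceNat (xs : List Char) (i k : Nat) :
    PySem.List.slice xs (some (i : Int)) (some ((i : Int) + (k : Int))) = (xs.drop i).take k :=
  PySem.List.slice_natCast_add xs i k

-- a k-gram of s matches a k-gram of s.reverse at some j ⇔ its reverse occurs in s
lemma pvHit_iff (s : List Char) (k i : Nat) (hik : i + k ≤ s.length) :
    (∃ j : Int, 0 ≤ j ∧ j < (s.length : Int) - (k : Int) + 1 ∧
        PySem.List.slice s.reverse (some j) (some (j + (k : Int)))
          = PySem.List.slice s (some (i : Int)) (some ((i : Int) + (k : Int)))) ↔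
      pvRevHit s k i := by
  set n : Nat := s.length with hn
  set x : List Char := (s.drop i).take k with hx
  have hxlen : x.length = k := by simp [hx]; omega
  rw [show PySem.List.slice s (some (i : Int)) (some ((i : Int) + (k : Int))) = x from pvSliceNat s i k]
  constructor
  · rintro ⟨j, hj0, hj1, hje⟩
    obtain ⟨jN, rfl⟩ : ∃ jN : Nat, (jN : Int) = j := ⟨j.toNat, Int.toNat_of_nonneg hj0⟩
    rw [pvSliceNat s.reverse jN k] at hje
    have hinrev : x <:+: s.reverse := by
      rw [← hje]
      exact ((List.take_prefix k (s.reverse.drop jN)).isInfix).trans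
        (List.drop_suffix jN s.reverse).isInfix
    have h4 := List.reverse_infix.mpr hinrev
    simpa [pvRevHit, ← hx] using h4
  · intro hrev
    have hxr : x <:+: s.reverse := by
      have := List.reverse_infix.mpr (by simpa [pvRevHit, ← hx] using hrev : x.reverse <:+: s)
      simpa using this
    obtain ⟨u, t, hut⟩ := hxr
    have hlen : u.length + k + t.length = n := by
      have h := congrArg List.length hut
      simp only [List.length_append, List.length_reverse, hxlen] at h
      omega
    refine ⟨(u.length : Int), by omega, by omega, ?_⟩
    rw [pvSliceNat s.reverse u.length k, ← hut, List.append_assoc, List.drop_left,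
      List.take_left' hxlen]

-- A returns False ⇔ some k-gram strictly before the last window reverse-occurs, k = max(m+1,0)
lemma pvA_false_iff (sequence : String) (m : Int) :
    inverse_motif_repeat sequence m = false ↔
      m < (sequence.toList.length : Int) - 1 ∧
        pvGramMatch sequence.toList (max (m + 1) 0)
          ((sequence.toList.length : Int) - max (m + 1) 0) := by
  set s : List Char := sequence.toList with hsdef
  rw [show inverse_motif_repeat sequence m
      = pvLoopA s m (((s.length : Int) - 1 - m).toNat) from rfl, pvLoopA_false_iff]
  set n : Nat := s.length with hn
  set K : Nat := (max (m + 1) 0).toNat with hKdef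
  have hK : ((K : Nat) : Int) = max (m + 1) 0 := Int.toNat_of_nonneg (le_max_right _ _)
  have hKlb : m + 1 ≤ (K : Int) := by rw [hK]; exact le_max_left _ _
  have hKor : (K : Int) = m + 1 ∨ (K : Int) = 0 := by
    have h := max_choice (m + 1) (0 : Int)
    rw [← hK] at h; exact h
  rw [show max (m + 1) 0 = ((K : Nat) : Int) from hK.symm]
  constructor
  · rintro ⟨L, hmL, hLf, i, hi0, hin, hiL, hinf⟩
    have hLn : L ≤ (n : Int) - 1 := by omega
    refine ⟨by omega, ?_⟩
    unfold pvGramMatch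
    obtain ⟨iN, rfl⟩ : ∃ iN : Nat, (iN : Int) = i := ⟨i.toNat, Int.toNat_of_nonneg hi0⟩
    by_cases hKL : (K : Int) ≤ L
    · -- the length-K prefix of the found sample reverse-occurs too
      have hL0 : 0 ≤ L := le_trans (by positivity) hKL
      have hiKn : iN + K < n := by omega
      have hsample : PySem.List.slice s (some (iN : Int)) (some ((iN : Int) + L))
          = (s.drop iN).take L.toNat := by
        have := pvSliceNat s iN L.toNat
        rwa [Int.toNat_of_nonneg hL0] at this
      set y : List Char := (s.drop iN).take K with hy
      have hyrev : pvRevHit s K iN := by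
        have hpre : y <+: (s.drop iN).take L.toNat := by
          have heq : List.take K (List.drop iN s)
              = List.take K (List.take L.toNat (List.drop iN s)) := by
            rw [List.take_take]; congr 1; omega
          rw [hy, heq]
          exact List.take_prefix _ _
        have h1 : y.reverse <:+ ((s.drop iN).take L.toNat).reverse :=
          List.reverse_suffix.mpr hpre
        exact h1.isInfix.trans (hsample ▸ hinf)
      refine ⟨(iN : Int), by omega, by omega, ?_⟩
      exact (pvHit_iff s K iN (by omega)).mpr hyrev
    · -- here max (m+1) 0 = 0: the empty gram matches anywhere
      have hK0 : (K : Int) = 0 := by omega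
      have hn1 : 1 ≤ n := by omega
      refine ⟨0, le_refl 0, by omega, ?_⟩
      rw [hK0]
      refine ⟨0, le_refl 0, by omega, ?_⟩
      have h1 := pvSliceNat s 0 0
      have h2 := pvSliceNat s.reverse 0 0
      simp only [Nat.cast_zero, add_zero] at h1 h2 ⊢
      rw [h1, h2]; simp
  · rintro ⟨hlt, i, hi0, hi1, hj⟩
    obtain ⟨iN, rfl⟩ : ∃ iN : Nat, (iN : Int) = i := ⟨i.toNat, Int.toNat_of_nonneg hi0⟩
    have hrev : pvRevHit s K iN := (pvHit_iff s K iN (by omega)).mp hj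
    refine ⟨(K : Int), by omega, by omega, (iN : Int), by omega, by omega, by omega, ?_⟩
    rw [pvSliceNat s iN K]
    simpa [pvRevHit] using hrev

-- B returns False ⇔ nonempty with m < n-1, and m negative or some k-gram reverse-occurs
lemma pvB_false_iff (sequence : String) (m : Int) :
    inverse_motif_repeat_alt sequence m = false ↔
      ¬ ((sequence.toList.length : Int) = 0 ∨ m ≥ (sequence.toList.length : Int) - 1) ∧
        (m < 0 ∨ pvGramMatch sequence.toList (m + 1)
          ((sequence.toList.length : Int) - (m + 1) + 1)) := by
  set s : List Char := sequence.toList with hsdef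
  unfold inverse_motif_repeat_alt
  rw [← hsdef]
  by_cases h1 : (s.length : Int) = 0 ∨ m ≥ (s.length : Int) - 1
  · rw [if_pos h1]
    constructor
    · intro h; exact absurd h (by simp)
    · rintro ⟨hc, _⟩; exact absurd h1 hc
  · rw [if_neg h1]
    by_cases h2 : m < 0
    · rw [if_pos h2]
      constructor
      · intro _; exact ⟨h1, Or.inl h2⟩
      · intro _; rfl
    · rw [if_neg h2]
      simp only [List.all_eq_false, Bool.not_eq_true, Bool.not_eq_false', pvGramMatch,
        pvGramsB, PySem.Set.contains_iff, PySem.Set.mem_ofList, List.mem_map,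
        PySem.List.mem_pyRange_one]
      constructor
      · rintro ⟨i, ⟨hi0, hi1⟩, j, ⟨hj0, hj1⟩, hje⟩
        exact ⟨h1, Or.inr ⟨i, hi0, hi1, j, hj0, hj1, hje⟩⟩
      · rintro ⟨_, h⟩
        rcases h with h | ⟨i, hi0, hi1, j, hj0, hj1, hje⟩
        · omega
        · exact ⟨i, ⟨hi0, hi1⟩, j, ⟨hj0, hj1⟩, hje⟩

-- ===== VERDICT (by name: the statement is the Claim_ definition above) =====
theorem inverse_motif_repeat_spec : Claim_unchanged_inverse_motif_repeat := by
  intro sequence max_length _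
  unfold Spec_inverse_motif_repeat
  intro hD
  rw [pvD_iff] at hD
  cases hA : inverse_motif_repeat sequence max_length <;>
    cases hB : inverse_motif_repeat_alt sequence max_length
  · rfl
  · -- A false, B true: show B is false too
    exfalso
    rw [pvA_false_iff] at hA
    rw [← Bool.not_eq_false, pvB_false_iff] at hB
    obtain ⟨hlt, hmatch⟩ := hA
    unfold pvGramMatch at hmatch
    obtain ⟨i, hi0, hi1, hj⟩ := hmatch
    apply hB
    have hKnn : (0 : Int) ≤ max (max_length + 1) 0 := le_max_right _ _
    have hKlb : max_length + 1 ≤ max (max_length + 1) 0 := le_max_left _ _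
    refine ⟨by push_neg; constructor <;> omega, ?_⟩
    by_cases hm : max_length < 0
    · exact Or.inl hm
    · right
      have hmx : max (max_length + 1) 0 = max_length + 1 := max_eq_left (by omega)
      rw [hmx] at hi1 hj
      unfold pvGramMatch
      exact ⟨i, hi0, by omega, hj⟩
  · -- A true, B false: outside D_ this cannot happen
    exfalso
    rw [pvB_false_iff] at hB
    obtain ⟨h1, h2⟩ := hB
    push_neg at h1
    rw [← Bool.not_eq_false, pvA_false_iff] at hA
    by_cases hm : max_length < 0
    · -- negative max_length: the empty gram makes A false as well
      apply hA
      have hmx : max (max_length + 1) 0 = 0 := max_eq_right (by omega)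
      rw [hmx]
      refine ⟨by omega, ?_⟩
      unfold pvGramMatch
      refine ⟨0, le_refl 0, by omega, 0, le_refl 0, by omega, ?_⟩
      have ha := pvSliceNat sequence.toList 0 0
      have hb := pvSliceNat sequence.toList.reverse 0 0
      simp only [Nat.cast_zero, add_zero] at ha hb ⊢
      rw [ha, hb]; simp
    · rcases h2 with hneg | hmatch
      · omega
      · unfold pvGramMatch at hmatch
        obtain ⟨i, hi0, hi1, hj⟩ := hmatch
        have hmx : max (max_length + 1) 0 = max_length + 1 := max_eq_left (by omega)
        have hK : (((max_length + 1).toNat : Nat) : Int) = max_length + 1 :=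
          Int.toNat_of_nonneg (by omega)
        obtain ⟨iN, rfl⟩ : ∃ iN : Nat, (iN : Int) = i := ⟨i.toNat, Int.toNat_of_nonneg hi0⟩
        by_cases hfront : (iN : Int) < (sequence.toList.length : Int) - (max_length + 1)
        · -- a match strictly before the last window: A would be false
          apply hA
          refine ⟨by omega, ?_⟩
          rw [hmx]
          unfold pvGramMatch
          exact ⟨(iN : Int), hi0, by omega, hj⟩
        · -- the match IS the last window and no window before it matches: that is D_
          apply hD
          have hjK : ∃ j : Int, 0 ≤ j ∧
              j < (sequence.toList.length : Int) - (((max_length + 1).toNat : Nat) : Int) + 1 ∧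
              PySem.List.slice sequence.toList.reverse (some j)
                  (some (j + (((max_length + 1).toNat : Nat) : Int)))
                = PySem.List.slice sequence.toList (some (iN : Int))
                  (some ((iN : Int) + (((max_length + 1).toNat : Nat) : Int))) := by
            rw [hK]; exact hj
          have hiN : iN = sequence.toList.length - (max_length + 1).toNat := by omega
          refine ⟨by omega, by omega, ?_, ?_⟩
          · have := (pvHit_iff sequence.toList (max_length + 1).toNat iN (by omega)).mp hjK
            rwa [hiN] at this
          · intro i' hi'
            intro hhit
            have hj' := (pvHit_iff sequence.toList (max_length + 1).toNat i' (by omega)).mpr hhit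
            apply hA
            refine ⟨by omega, ?_⟩
            rw [hmx]
            unfold pvGramMatch
            exact ⟨(i' : Int), by omega, by omega, by rwa [hK] at hj'⟩
  · rfl

theorem inverse_motif_repeat_changed : Claim_changed_inverse_motif_repeat := by
  unfold Claim_changed_inverse_motif_repeat; decide

theorem inverse_motif_repeat_tight : Claim_exact_inverse_motif_repeat := by
  intro sequence max_length _ hD
  rw [pvD_iff] at hD
  obtain ⟨hm0, hlt, hhit, hnone⟩ := hD
  have hK : (((max_length + 1).toNat : Nat) : Int) = max_length + 1 :=
    Int.toNat_of_nonneg (by omega)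
  have hmx : max (max_length + 1) 0 = max_length + 1 := max_eq_left (by omega)
  have hAtrue : inverse_motif_repeat sequence max_length = true := by
    rw [← Bool.not_eq_false, pvA_false_iff]
    rintro ⟨_, hmatch⟩
    unfold pvGramMatch at hmatch
    rw [hmx] at hmatch
    obtain ⟨i, hi0, hi1, hj⟩ := hmatch
    obtain ⟨iN, rfl⟩ : ∃ iN : Nat, (iN : Int) = i := ⟨i.toNat, Int.toNat_of_nonneg hi0⟩
    rw [← hK] at hj
    exact hnone iN (by omega)
      ((pvHit_iff sequence.toList (max_length + 1).toNat iN (by omega)).mp hj)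
  have hBfalse : inverse_motif_repeat_alt sequence max_length = false := by
    rw [pvB_false_iff]
    refine ⟨by push_neg; constructor <;> omega, Or.inr ?_⟩
    unfold pvGramMatch
    refine ⟨((sequence.toList.length - (max_length + 1).toNat : Nat) : Int), by omega, by omega, ?_⟩
    rw [← hK]
    exact (pvHit_iff sequence.toList (max_length + 1).toNat
      (sequence.toList.length - (max_length + 1).toNat) (by omega)).mpr hhit
  rw [hAtrue, hBfalse]
  simp
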